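-- pv_equiv track=rewrite | github.com/Michael-YuZong/AI-Fiance | src/processors/strategy.py | _normalize_strategy_symbols
-- ===== SOURCE A (Python) =====
-- from typing import Any, Dict, List, Mapping, Sequence, Tuple
--
-- def _normalize_strategy_symbols(symbols: Sequence[str]) -> List[str]:
--     normalized_symbols: List[str] = []
--     seen_symbols: set[str] = set()
--     for item in symbols:
--         for token in str(item or "").split(","):
--             symbol = token.strip()
--             if symbol and symbol not in seen_symbols:
--                 seen_symbols.add(symbol)
--                 normalized_symbols.append(symbol)
--     return normalized_symbols
-- ===== SOURCE B (Python) =====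
-- from typing import List, Sequence
--
-- def _normalize_strategy_symbols(symbols: Sequence[str]) -> List[str]:
--     def tokens_of(item):
--         return [t for t in map(str.strip, str(item or "").split(",")) if t]
--
--     def dedup(pending):
--         # quicksort-style dedup: emit the head, purge its copies, recurse
--         if not pending:
--             return []
--         head = pending[0]
--         return [head] + dedup([t for t in pending[1:] if t != head])
--
--     return dedup([t for item in symbols for t in tokens_of(item)])
-- ===== Notes on version B (the rewrite author's own statement) =====
-- stated objective: alternative
-- what changed: Replaces A's interleaved seen-set check-and-append loop by a gather pass followed by a recursive head-and-filter dedup that purges each emitted token from the remainder (no seen-set or dict at all).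
import Mathlib
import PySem

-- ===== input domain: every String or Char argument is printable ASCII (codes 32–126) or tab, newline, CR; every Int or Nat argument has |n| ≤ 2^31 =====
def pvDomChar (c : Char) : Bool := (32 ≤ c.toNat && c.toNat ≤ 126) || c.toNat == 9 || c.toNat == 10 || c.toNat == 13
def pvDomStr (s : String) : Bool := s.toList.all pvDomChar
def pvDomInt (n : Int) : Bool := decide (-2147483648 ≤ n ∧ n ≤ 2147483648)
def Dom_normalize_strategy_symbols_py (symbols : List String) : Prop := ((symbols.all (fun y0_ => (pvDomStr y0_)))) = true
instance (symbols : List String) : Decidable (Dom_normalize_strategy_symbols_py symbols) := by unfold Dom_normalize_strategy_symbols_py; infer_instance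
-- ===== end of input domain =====

-- B gathers all cleaned tokens in one pass, then deduplicates by a recursive head-and-filter
-- pass (emit the head, purge its duplicates from the remainder, recurse) instead of A's
-- interleaved seen-set check-and-append loop (alternative algorithm, not faster).


-- ===== PORT A =====
-- literal port of A: fold over items, inner fold over the comma-split tokens,
-- carrying (normalized_symbols, seen_symbols); 'str(item or "")' is the if-expression.
def normalize_strategy_symbols_py (symbols : List String) : List String :=
  (symbols.foldl
    (fun (st : List String × PySem.Set String) item =>
      ((PySem.Str.split? (if item == "" then "" else item) ",").getD []).foldl
        (fun st token =>
          let symbol := PySem.Str.strip token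
          if symbol ≠ "" ∧ PySem.Set.contains st.2 symbol = false then
            (st.1 ++ [symbol], PySem.Set.add st.2 symbol)
          else st) st)
    ([], PySem.Set.empty)).1

-- ===== PORT B =====
-- helper tokens_of: the cleaned tokens of one item (map strip, drop empties).
def pvTokensOf (item : String) : List String :=
  (((PySem.Str.split? (if item == "" then "" else item) ",").getD []).map PySem.Str.strip).filter
    (fun t => t ≠ "")

-- helper dedup: emit the head, purge its copies from the remainder, recurse.
def pvDedup : List String → List String
  | [] => []
  | head :: rest => head :: pvDedup (rest.filter (fun t => t ≠ head))
termination_by ts => ts.length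
decreasing_by
  simpa using Nat.lt_succ_of_le (List.length_filter_le _ rest.attach)

-- literal port of B: gather pass (flatMap = the comprehension), then recursive dedup.
def normalize_strategy_symbols_py_alt (symbols : List String) : List String :=
  pvDedup (symbols.flatMap pvTokensOf)

-- ===== PRECONDITION & SPEC =====
def Spec_normalize_strategy_symbols_py (symbols : List String) (out : List String) : Prop := out = normalize_strategy_symbols_py_alt symbols
instance (symbols : List String) (out : List String) : Decidable (Spec_normalize_strategy_symbols_py symbols out) := by unfold Spec_normalize_strategy_symbols_py; infer_instance

-- ===== CLAIM (what is proved, stated in full; the proofs are below) =====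
def Claim_equal_normalize_strategy_symbols_py : Prop := ∀ (symbols : List String), Dom_normalize_strategy_symbols_py symbols → Spec_normalize_strategy_symbols_py symbols (normalize_strategy_symbols_py symbols)

-- ===== LEMMAS AND PROOFS =====

-- A's inner token loop from an equal-component state equals a Set.add fold over the
-- stripped, nonempty-filtered tokens, keeping both components equal.
theorem pv_inner (ts : List String) (s : PySem.Set String) :
    ts.foldl
      (fun (st : List String × PySem.Set String) token =>
        let symbol := PySem.Str.strip token
        if symbol ≠ "" ∧ PySem.Set.contains st.2 symbol = false then
          (st.1 ++ [symbol], PySem.Set.add st.2 symbol)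
        else st) (s, s)
    = (((ts.map PySem.Str.strip).filter (fun x => x ≠ "")).foldl PySem.Set.add s,
       ((ts.map PySem.Str.strip).filter (fun x => x ≠ "")).foldl PySem.Set.add s) := by
  induction ts generalizing s with
  | nil => rfl
  | cons t ts ih =>
    rw [List.foldl_cons]
    by_cases he : PySem.Str.strip t = ""
    · have h1 : (fun (st : List String × PySem.Set String) token =>
          let symbol := PySem.Str.strip token
          if symbol ≠ "" ∧ PySem.Set.contains st.2 symbol = false then
            (st.1 ++ [symbol], PySem.Set.add st.2 symbol)
          else st) (s, s) t = (s, s) := by simp [he]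
      simp only [h1]; rw [ih]
      simp [List.filter_cons, he]
    · by_cases hc : PySem.Str.strip t ∈ s
      · have hadd : PySem.Set.add s (PySem.Str.strip t) = s := by
          simp [PySem.Set.add, hc]
        have h1 : (fun (st : List String × PySem.Set String) token =>
            let symbol := PySem.Str.strip token
            if symbol ≠ "" ∧ PySem.Set.contains st.2 symbol = false then
              (st.1 ++ [symbol], PySem.Set.add st.2 symbol)
            else st) (s, s) t = (s, s) := by simp [he, hc]
        simp only [h1]; rw [ih]
        simp [List.filter_cons, List.foldl_cons, he, hadd]
      · have hadd : PySem.Set.add s (PySem.Str.strip t) = s ++ [PySem.Str.strip t] := by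
          simp [PySem.Set.add, hc]
        have h1 : (fun (st : List String × PySem.Set String) token =>
            let symbol := PySem.Str.strip token
            if symbol ≠ "" ∧ PySem.Set.contains st.2 symbol = false then
              (st.1 ++ [symbol], PySem.Set.add st.2 symbol)
            else st) (s, s) t
            = (s ++ [PySem.Str.strip t], s ++ [PySem.Str.strip t]) := by
          simp [he, hc, hadd]
        simp only [h1]; rw [ih]
        simp [List.filter_cons, List.foldl_cons, he, hadd]

-- A's outer loop from an equal-component state equals a Set.add fold over the flattened tokens.
theorem pv_outer (symbols : List String) (s : PySem.Set String) :
    (symbols.foldl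
      (fun (st : List String × PySem.Set String) item =>
        ((PySem.Str.split? (if item == "" then "" else item) ",").getD []).foldl
          (fun st token =>
            let symbol := PySem.Str.strip token
            if symbol ≠ "" ∧ PySem.Set.contains st.2 symbol = false then
              (st.1 ++ [symbol], PySem.Set.add st.2 symbol)
            else st) st) (s, s)).1
    = (symbols.flatMap pvTokensOf).foldl PySem.Set.add s := by
  induction symbols generalizing s with
  | nil => rfl
  | cons x xs ih =>
    simp only [List.foldl_cons, List.flatMap_cons, List.foldl_append, pvTokensOf]
    rw [pv_inner, ih]

-- folding Set.add over ts ignores elements already in the accumulator.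
theorem pv_filter_mem (x : String) (ts : List String) (s : PySem.Set String) (hx : x ∈ s) :
    ts.foldl PySem.Set.add s = (ts.filter (fun t => t ≠ x)).foldl PySem.Set.add s := by
  induction ts generalizing s with
  | nil => rfl
  | cons t ts ih =>
    by_cases ht : t = x
    · subst ht
      have : PySem.Set.add s t = s := by simp [PySem.Set.add, hx]
      simp [List.filter_cons, List.foldl_cons, this, ih _ hx]
    · have hx' : x ∈ PySem.Set.add s t := by
        simp [PySem.Set.add]; split <;> simp [hx]
      simp [List.filter_cons, ht, List.foldl_cons, ih _ hx']

-- an element absent from ts can be peeled off the front of the accumulator.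
theorem pv_peel (ts : List String) (x : String) (s : List String) (hx : x ∉ ts) :
    ts.foldl PySem.Set.add (x :: s) = x :: ts.foldl PySem.Set.add s := by
  induction ts generalizing s with
  | nil => rfl
  | cons t ts ih =>
    have htx : t ≠ x := fun h => hx (h ▸ List.mem_cons_self)
    have : PySem.Set.add (x :: s) t = x :: PySem.Set.add s t := by
      simp [PySem.Set.add, PySem.Set.contains, htx]
      split <;> simp
    rw [List.foldl_cons, this, List.foldl_cons,
        ih _ (fun h => hx (List.mem_cons_of_mem _ h))]

-- the recursive head-and-filter dedup computes PySem.Set.ofList (first occurrences, in order).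
theorem pv_dedup_eq_ofList : ∀ ts : List String, pvDedup ts = PySem.Set.ofList ts
  | [] => by simp [pvDedup]
  | head :: rest => by
    have ih := pv_dedup_eq_ofList (rest.filter (fun t => t ≠ head))
    have hstep : pvDedup (head :: rest) = head :: pvDedup (rest.filter (fun t => t ≠ head)) := by
      simp [pvDedup]
    have hnot : head ∉ rest.filter (fun t => t ≠ head) := by
      simp [List.mem_filter]
    have hrhs : PySem.Set.ofList (head :: rest)
        = head :: PySem.Set.ofList (rest.filter (fun t => t ≠ head)) := by
      rw [PySem.Set.ofList_eq_foldl, List.foldl_cons,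
          show PySem.Set.add ([] : PySem.Set String) head = [head] from rfl,
          pv_filter_mem head rest [head] (by simp),
          show ([head] : List String) = head :: [] from rfl, pv_peel _ _ _ hnot,
          PySem.Set.ofList_eq_foldl]
    rw [hstep, ih, hrhs]
termination_by ts => ts.length
decreasing_by
  simpa using Nat.lt_succ_of_le (List.length_filter_le _ rest)

-- ===== VERDICT (by name: the statement is the Claim_ definition above) =====
theorem normalize_strategy_symbols_py_spec : Claim_equal_normalize_strategy_symbols_py := by
  intro symbols _
  unfold Spec_normalize_strategy_symbols_py normalize_strategy_symbols_py
    normalize_strategy_symbols_py_alt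
  rw [show (([], PySem.Set.empty) : List String × PySem.Set String)
        = (([] : List String), ([] : List String)) from rfl]
  rw [pv_outer, pv_dedup_eq_ofList, PySem.Set.ofList_eq_foldl]
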